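-- pv_equiv track=rewrite | github.com/vikassharma-sde/collate-vikas | ingestion_game/src/ingestion_game/cli.py | run_ingest
-- ===== SOURCE A (Python) =====
-- from typing import Dict, List, Tuple, Callable, Optional
--
-- def type_validator(type_name: str) -> Callable[[str], bool]:
--     """Return a validator function for basic types."""
--     if type_name == 'int':
--         def is_int(val: str) -> bool:
--             try:
--                 int(val)
--                 return True
--             except Exception:
--                 return False
--         return is_int
--     elif type_name == 'str':
--         def is_str(val: str) -> bool:
--             return isinstance(val, str) and val != ''
--         return is_str
--     else:
--         # For unknown types just accept any non-empty string
--         def is_any(val: str) -> bool: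
--             return val != ''
--         return is_any
--
-- def parse_row(line: str, delimiter: str = ',') -> Dict[str, str]:
--     """Parse a line like 'a=1,b=2' into dict{'a':'1','b':'2'}.
--     It tolerates spaces. If a pair doesn't have '=', it's ignored.
--     """
--     d = {}
--     parts = [p for p in line.strip().split(delimiter) if p != '']
--     for p in parts:
--         if '=' not in p:
--             continue
--         k, v = p.split('=', 1)
--         d[k.strip()] = v.strip()
--     return d
--
-- def validate_row(row: Dict[str, str], schema: List[Tuple[str, str]], validators: Dict[str, Callable[[str], bool]]) -> bool:
--     """Return True if row contains all schema keys and each value passes its validator."""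
--     for key, _ in schema:
--         if key not in row:
--             return False
--         val = row[key]
--         # empty values considered invalid
--         if val == '':
--             return False
--         validator = validators.get(key)
--         if validator and not validator(val):
--             return False
--     return True
--
-- def run_ingest(lines: List[str],
--                schema: List[Tuple[str, str]],
--                hierarchy: List[str],
--                type_field: str = 'type',
--                delimiter: str = ',') -> Tuple[List[str], List[List[str]]]:
--     """Process lines and return (header, rows) where rows are lists of values in header order."""
--     validators = {k: type_validator(t) for k, t in schema}
--     header_keys = [k for k, _ in schema]
--
--     # collect rows by type preserving input order
--     by_type = {t: [] for t in hierarchy}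
--
--     for line in lines:
--         if not line.strip():
--             continue
--         row = parse_row(line, delimiter=delimiter)
--         # If type field missing or type not in hierarchy => skip
--         if type_field not in row:
--             continue
--         typ = row[type_field]
--         if typ not in hierarchy:
--             continue
--         # Validate row contains schema keys and types
--         if not validate_row(row, schema, validators):
--             continue
--         # Append values in header order
--         values = [row.get(k, '') for k in header_keys]
--         by_type[typ].append(values)
--
--     # Now emit rows in hierarchy order
--     out_rows = []
--     for t in hierarchy:
--         out_rows.extend(by_type.get(t, []))
--
--     return header_keys, out_rows
-- ===== SOURCE B (Python) =====
-- def run_ingest(lines, schema, hierarchy, type_field='type', delimiter=','):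
--     """Process lines and return (header, rows): collect validated (type, values)
--     pairs in one flat pass, then emit groups by scanning the flat list once per
--     hierarchy entry (no dict of per-type buckets)."""
--     header_keys = [k for k, _ in schema]
--     types = dict(schema)  # effective type per key: last schema entry wins
--
--     def int_like(s):
--         try:
--             int(s)
--             return True
--         except Exception:
--             return False
--
--     def parse(line):
--         row = {}
--         for part in line.strip().split(delimiter):
--             if '=' in part:
--                 k, v = part.split('=', 1)
--                 row[k.strip()] = v.strip()
--         return row
--
--     collected = []
--     for line in lines:
--         if not line.strip():
--             continue
--         row = parse(line)
--         typ = row.get(type_field)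
--         if typ is None or typ not in hierarchy:
--             continue
--         if all(row.get(k, '') != '' and (types[k] != 'int' or int_like(row[k]))
--                for k in types):
--             collected.append((typ, [row.get(k, '') for k in header_keys]))
--     out_rows = [vals for t in hierarchy for (typ, vals) in collected if typ == t]
--     return header_keys, out_rows
-- ===== Notes on version B (the rewrite author's own statement) =====
-- stated objective: faster
-- what changed: B drops A's dict of per-type buckets and A's dict of validator closures: it collects validated (type, values) pairs into one flat list in a single pass, validating directly against the schema's effective type per distinct key (no closure construction or per-entry closure lookup), and emits output by scanning the flat list once per hierarchy entry.
import Mathlib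
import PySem

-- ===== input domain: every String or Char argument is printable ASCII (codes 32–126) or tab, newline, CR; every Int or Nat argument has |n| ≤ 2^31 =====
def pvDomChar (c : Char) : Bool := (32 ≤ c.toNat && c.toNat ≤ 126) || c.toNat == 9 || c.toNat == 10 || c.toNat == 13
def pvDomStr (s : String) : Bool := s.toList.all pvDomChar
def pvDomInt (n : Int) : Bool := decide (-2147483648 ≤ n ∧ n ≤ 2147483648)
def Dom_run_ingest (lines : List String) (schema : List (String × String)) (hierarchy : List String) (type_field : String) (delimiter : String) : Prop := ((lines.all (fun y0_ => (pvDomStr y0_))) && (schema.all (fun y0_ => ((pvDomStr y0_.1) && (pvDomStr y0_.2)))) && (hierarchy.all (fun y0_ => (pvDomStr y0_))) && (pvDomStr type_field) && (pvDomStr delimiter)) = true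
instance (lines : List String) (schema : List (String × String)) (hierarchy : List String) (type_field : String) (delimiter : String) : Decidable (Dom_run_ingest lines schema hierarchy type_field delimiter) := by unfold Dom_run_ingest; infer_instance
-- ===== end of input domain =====

-- B replaces A's per-type dict of buckets (and its dict of validator closures) by one flat
-- pass collecting validated (type, values) pairs and a per-hierarchy-entry scan of that list.

-- ===== PORT A =====
def type_validator (type_name : String) : String → Bool :=
  if type_name == "int" then
    fun val => (PySem.Int.ofStr? val).isSome    -- int(val) succeeds
  else if type_name == "str" then
    fun val => !(val == "")                     -- isinstance(val, str) is always True here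
  else
    fun val => !(val == "")

def parse_row (line : String) (delimiter : String) : Option (PySem.Dict String String) :=
  (PySem.Str.split? (PySem.Str.strip line) delimiter).map (fun parts =>
    ((parts.filter (fun p => p != "")).foldl (fun d p =>
      if PySem.Str.isIn "=" p then
        (match PySem.Str.splitMax? p "=" 1 with
         | some [k, v] => d.insert (PySem.Str.strip k) (PySem.Str.strip v)
         | _ => d)      -- unreachable: '=' in p gives exactly two pieces
      else d) PySem.Dict.empty))

def validate_row (row : PySem.Dict String String) (schema : List (String × String)) (validators : PySem.Dict String (String → Bool)) : Bool :=
  match schema with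
  | [] => true
  | (key, _) :: rest =>
    if !(row.contains key) then false
    else
      let val := row.getD key ""               -- row[key]; key is present
      if val == "" then false
      else
        match validators.get? key with
        | some validator => if !(validator val) then false else validate_row row rest validators
        | none => validate_row row rest validators

def run_ingest (lines : List String) (schema : List (String × String)) (hierarchy : List String) (type_field : String) (delimiter : String) : List String × List (List String) :=
  let validators := schema.foldl (fun d p => d.insert p.1 (type_validator p.2)) PySem.Dict.empty
  let header_keys := schema.map (fun p => p.1)
  let by_type0 := hierarchy.foldl (fun d t => d.insert t ([] : List (List String))) PySem.Dict.empty
  let by_type := lines.foldl (fun d line =>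
    if PySem.Str.strip line == "" then d
    else
      match parse_row line delimiter with
      | none => d      -- delimiter = "": Python raises ValueError; excluded by Pre_
      | some row =>
        match row.get? type_field with
        | none => d
        | some typ =>
          if !(hierarchy.contains typ) then d
          else if !(validate_row row schema validators) then d
          else d.modify typ [] (fun l => l ++ [header_keys.map (fun k => row.getD k "")])) by_type0
  let out_rows := hierarchy.foldl (fun acc t => acc ++ by_type.getD t []) []
  (header_keys, out_rows)

-- ===== PORT B =====
def pvIntLike (s : String) : Bool := (PySem.Int.ofStr? s).isSome

def pvParseB (line : String) (delimiter : String) : Option (PySem.Dict String String) :=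
  (PySem.Str.split? (PySem.Str.strip line) delimiter).map (fun parts =>
    parts.foldl (fun d p =>
      if PySem.Str.isIn "=" p then
        (match PySem.Str.splitMax? p "=" 1 with
         | some [k, v] => d.insert (PySem.Str.strip k) (PySem.Str.strip v)
         | _ => d)      -- unreachable: '=' in p gives exactly two pieces
      else d) PySem.Dict.empty)

def run_ingest_alt (lines : List String) (schema : List (String × String)) (hierarchy : List String) (type_field : String) (delimiter : String) : List String × List (List String) :=
  let header_keys := schema.map (fun p => p.1)
  let types := PySem.Dict.ofList schema
  let collected := lines.foldl (fun acc line =>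
    if PySem.Str.strip line == "" then acc
    else
      match pvParseB line delimiter with
      | none => acc    -- delimiter = "": Python raises ValueError; excluded by Pre_
      | some row =>
        match row.get? type_field with
        | none => acc
        | some typ =>
          if !(hierarchy.contains typ) then acc
          else if types.keys.all (fun k =>
                  (!(row.getD k "" == "")) &&
                  ((!(types.getD k "" == "int")) || pvIntLike (row.getD k "")))
          then acc ++ [(typ, header_keys.map (fun k => row.getD k ""))]
          else acc) ([] : List (String × List String))
  (header_keys, hierarchy.flatMap (fun t => (collected.filter (fun p => p.1 == t)).map (fun p => p.2)))

-- ===== PRECONDITION & SPEC =====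
-- Pre_ excludes exactly the inputs on which Python A raises: an empty delimiter
-- together with at least one non-blank line makes str.split('') raise ValueError.
def Pre_run_ingest (lines : List String) (schema : List (String × String)) (hierarchy : List String) (type_field : String) (delimiter : String) : Prop :=
  delimiter ≠ "" ∨ ∀ line ∈ lines, PySem.Str.strip line = ""
instance (lines : List String) (schema : List (String × String)) (hierarchy : List String) (type_field : String) (delimiter : String) : Decidable (Pre_run_ingest lines schema hierarchy type_field delimiter) := by unfold Pre_run_ingest; infer_instance

def pvWitness_run_ingest : List String × (List (String × String)) × List String × String × String :=
  (["type=x,a=1", "type=y,a=2"], [("a", "int"), ("type", "str")], ["y", "x"], "type", ",")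

def Spec_run_ingest (lines : List String) (schema : List (String × String)) (hierarchy : List String) (type_field : String) (delimiter : String) (out : List String × List (List String)) : Prop := out = run_ingest_alt lines schema hierarchy type_field delimiter
instance (lines : List String) (schema : List (String × String)) (hierarchy : List String) (type_field : String) (delimiter : String) (out : List String × List (List String)) : Decidable (Spec_run_ingest lines schema hierarchy type_field delimiter out) := by unfold Spec_run_ingest; infer_instance

-- ===== CLAIM (what is proved, stated in full; the proofs are below) =====
def Claim_equal_run_ingest : Prop := ∀ (lines : List String) (schema : List (String × String)) (hierarchy : List String) (type_field : String) (delimiter : String), Dom_run_ingest lines schema hierarchy type_field delimiter → Pre_run_ingest lines schema hierarchy type_field delimiter → Spec_run_ingest lines schema hierarchy type_field delimiter (run_ingest lines schema hierarchy type_field delimiter)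

-- ===== LEMMAS AND PROOFS =====

-- A's parse (which pre-filters out empty pieces) equals B's parse: the fold step
-- ignores a piece without '=', and "" has no '='.
theorem parse_fold_filter (parts : List String) (d : PySem.Dict String String) :
    (parts.filter (fun p => p != "")).foldl (fun d p =>
      if PySem.Str.isIn "=" p then
        (match PySem.Str.splitMax? p "=" 1 with
         | some [k, v] => d.insert (PySem.Str.strip k) (PySem.Str.strip v)
         | _ => d)
      else d) d
    = parts.foldl (fun d p =>
      if PySem.Str.isIn "=" p then
        (match PySem.Str.splitMax? p "=" 1 with
         | some [k, v] => d.insert (PySem.Str.strip k) (PySem.Str.strip v)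
         | _ => d)
      else d) d := by
  induction parts generalizing d with
  | nil => rfl
  | cons p rest ih =>
    by_cases hp : p = ""
    · subst hp
      have h1 : PySem.Str.isIn "=" "" = false := by decide
      rw [List.filter_cons, if_neg (by simp), List.foldl_cons, if_neg (by decide)]
      exact ih d
    · rw [List.filter_cons, if_pos (by simp [hp]), List.foldl_cons, List.foldl_cons]
      exact ih _

theorem parse_row_eq_parseB (line delimiter : String) :
    parse_row line delimiter = pvParseB line delimiter := by
  unfold parse_row pvParseB
  cases h : PySem.Str.split? (PySem.Str.strip line) delimiter with
  | none => rfl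
  | some parts =>
    simp only [Option.map_some]
    exact congrArg some (parse_fold_filter parts _)

-- the validator dict A builds is the image under type_validator of the type dict B builds
theorem validators_get (schema : List (String × String)) (d1 : PySem.Dict String (String → Bool)) (d2 : PySem.Dict String String)
    (h : ∀ k, d1.get? k = (d2.get? k).map type_validator) (k : String) :
    (schema.foldl (fun d p => d.insert p.1 (type_validator p.2)) d1).get? k
      = ((schema.foldl (fun acc p => acc.insert p.1 p.2) d2).get? k).map type_validator := by
  induction schema generalizing d1 d2 with
  | nil => exact h k
  | cons p rest ih =>
    simp only [List.foldl_cons]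
    refine ih _ _ (fun k' => ?_)
    rw [PySem.Dict.get?_insert, PySem.Dict.get?_insert]
    by_cases hk : k' = p.1
    · simp [hk]
    · simp [hk, h k']

-- A's early-return validation loop as a Boolean `all` over the schema entries
theorem validate_row_eq_all (row : PySem.Dict String String) (schema : List (String × String)) (validators : PySem.Dict String (String → Bool)) :
    validate_row row schema validators
      = schema.all (fun p => row.contains p.1 && !(row.getD p.1 "" == "") &&
          (match validators.get? p.1 with
           | some f => f (row.getD p.1 "")
           | none => true)) := by
  induction schema with
  | nil => rfl
  | cons p rest ih =>
    obtain ⟨key, t⟩ := p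
    simp only [validate_row, List.all_cons]
    by_cases hc : row.contains key = true
    · by_cases hv : (row.getD key "" == "") = true
      · simp [hc, hv]
      · cases hg : validators.get? key with
        | none => simp [hc, hv, hg, ih]
        | some f =>
          by_cases hf : f (row.getD key "") = true
          · simp [hc, hv, hg, hf, ih]
          · simp [hc, hv, hg, hf]
    · simp [hc]

-- the two per-key checks agree (for every key, in or out of the dicts)
theorem entry_eq_check (row : PySem.Dict String String) (schema : List (String × String)) (k : String) :
    (row.contains k && !(row.getD k "" == "") &&
      (match (schema.foldl (fun d p => d.insert p.1 (type_validator p.2)) PySem.Dict.empty).get? k with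
       | some f => f (row.getD k "")
       | none => true))
    = ((!(row.getD k "" == "")) &&
       ((!((PySem.Dict.ofList schema).getD k "" == "int")) || pvIntLike (row.getD k ""))) := by
  have hcd : row.contains k = false → row.getD k "" = "" := fun hc => by
    simp [PySem.Dict.getD, (PySem.Dict.get?_eq_none_iff_contains row k).mpr hc]
  have hv' : (schema.foldl (fun d p => d.insert p.1 (type_validator p.2)) PySem.Dict.empty).get? k
      = ((PySem.Dict.ofList schema).get? k).map type_validator :=
    validators_get schema PySem.Dict.empty PySem.Dict.empty (fun _ => rfl) k
  rw [hv']
  cases hg : (PySem.Dict.ofList schema).get? k with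
  | none =>
    have hgD : (PySem.Dict.ofList schema).getD k "" = "" := by simp [PySem.Dict.getD, hg]
    rw [hgD]
    cases hc : row.contains k
    · rw [hcd hc]; simp
    · simp
  | some t =>
    have hgD : (PySem.Dict.ofList schema).getD k "" = t := by simp [PySem.Dict.getD, hg]
    rw [hgD]
    cases hc : row.contains k
    · rw [hcd hc]; simp
    · simp only [Option.map_some, Bool.true_and]
      by_cases hveq : (row.getD k "" == "") = true
      · simp [hveq]
      · unfold type_validator
        by_cases ht : (t == "int") = true
        · simp [ht, pvIntLike]
        · by_cases ht2 : (t == "str") = true <;> simp [ht, ht2, hveq]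

theorem all_congr_mem {α : Type} (l1 l2 : List α) (p : α → Bool)
    (h : ∀ x, x ∈ l1 ↔ x ∈ l2) : l1.all p = l2.all p := by
  rw [Bool.eq_iff_iff]
  simp only [List.all_eq_true]
  exact ⟨fun ha x hx => ha x ((h x).mpr hx), fun ha x hx => ha x ((h x).mp hx)⟩

-- A's full validation equals B's all-over-distinct-keys check
theorem validate_eq_checkB (row : PySem.Dict String String) (schema : List (String × String)) :
    validate_row row schema (schema.foldl (fun d p => d.insert p.1 (type_validator p.2)) PySem.Dict.empty)
      = (PySem.Dict.ofList schema).keys.all (fun k =>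
          (!(row.getD k "" == "")) &&
          ((!((PySem.Dict.ofList schema).getD k "" == "int")) || pvIntLike (row.getD k ""))) := by
  rw [validate_row_eq_all]
  have h1 := List.all_congr (rfl : schema = schema) (fun p => entry_eq_check row schema p.1)
  rw [h1]
  have h2 : schema.all (fun p =>
      (!(row.getD p.1 "" == "")) &&
      ((!((PySem.Dict.ofList schema).getD p.1 "" == "int")) || pvIntLike (row.getD p.1 "")))
      = (schema.map (fun p => p.1)).all (fun k =>
      (!(row.getD k "" == "")) &&
      ((!((PySem.Dict.ofList schema).getD k "" == "int")) || pvIntLike (row.getD k ""))) := by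
    rw [List.all_map]; rfl
  rw [h2]
  refine all_congr_mem _ _ _ (fun x => ?_)
  have hkeys : (PySem.Dict.ofList schema).keys = PySem.Set.update ([] : List String) (schema.map (fun p => p.1)) := by
    simpa using PySem.Dict.keys_foldl_insert_key schema (fun p => p.1) (fun _ p => p.2) PySem.Dict.empty
  rw [hkeys, PySem.Set.mem_update]
  simp

-- the initial bucket dict maps everything to []
theorem getD_init_gen (hierarchy : List String) (d : PySem.Dict String (List (List String)))
    (hd : ∀ t, d.getD t [] = []) (t : String) :
    (hierarchy.foldl (fun d t => d.insert t ([] : List (List String))) d).getD t [] = [] := by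
  induction hierarchy generalizing d with
  | nil => exact hd t
  | cons a rest ih =>
    simp only [List.foldl_cons]
    refine ih _ (fun t' => ?_)
    by_cases ht : t' = a
    · subst ht; rw [PySem.Dict.getD_insert_self]
    · rw [PySem.Dict.getD_insert_of_ne _ _ _ ht, hd]

theorem getD_init (hierarchy : List String) (t : String) :
    (hierarchy.foldl (fun d t => d.insert t ([] : List (List String))) PySem.Dict.empty).getD t [] = [] :=
  getD_init_gen hierarchy PySem.Dict.empty (fun _ => rfl) t

-- the per-line outcome, shared shape of both loops (proof-only helper)
def pvLineRes (schema : List (String × String)) (hierarchy : List String) (type_field : String) (delimiter : String) (line : String) : Option (String × List String) :=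
  if PySem.Str.strip line == "" then none
  else
    match pvParseB line delimiter with
    | none => none
    | some row =>
      match row.get? type_field with
      | none => none
      | some typ =>
        if !(hierarchy.contains typ) then none
        else if (PySem.Dict.ofList schema).keys.all (fun k =>
                (!(row.getD k "" == "")) &&
                ((!((PySem.Dict.ofList schema).getD k "" == "int")) || pvIntLike (row.getD k "")))
        then some (typ, schema.map (fun p => p.1) |>.map (fun k => row.getD k ""))
        else none

theorem stepA_eq (schema : List (String × String)) (hierarchy : List String) (type_field delimiter : String)
    (d : PySem.Dict String (List (List String))) (line : String) :
    (if PySem.Str.strip line == "" then d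
     else
       match parse_row line delimiter with
       | none => d
       | some row =>
         match row.get? type_field with
         | none => d
         | some typ =>
           if !(hierarchy.contains typ) then d
           else if !(validate_row row schema (schema.foldl (fun d p => d.insert p.1 (type_validator p.2)) PySem.Dict.empty)) then d
           else d.modify typ [] (fun l => l ++ [(schema.map (fun p => p.1)).map (fun k => row.getD k "")]))
    = (match pvLineRes schema hierarchy type_field delimiter line with
       | some p => d.modify p.1 [] (fun l => l ++ [p.2])
       | none => d) := by
  rw [parse_row_eq_parseB]
  unfold pvLineRes
  by_cases h0 : (PySem.Str.strip line == "") = true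
  · simp [h0]
  · cases hp : pvParseB line delimiter with
    | none => simp [h0, hp]
    | some row =>
      cases hg : row.get? type_field with
      | none => simp [h0, hp, hg]
      | some typ =>
        by_cases ht : typ ∈ hierarchy
        · by_cases hv : ((PySem.Dict.ofList schema).keys.all (fun k =>
              (!(row.getD k "" == "")) &&
              ((!((PySem.Dict.ofList schema).getD k "" == "int")) || pvIntLike (row.getD k "")))) = true
          · simp [h0, hp, hg, ht, hv, validate_eq_checkB]
          · simp [h0, hp, hg, ht, hv, validate_eq_checkB]
        · simp [h0, hp, hg, ht]

theorem stepB_eq (schema : List (String × String)) (hierarchy : List String) (type_field delimiter : String)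
    (acc : List (String × List String)) (line : String) :
    (if PySem.Str.strip line == "" then acc
     else
       match pvParseB line delimiter with
       | none => acc
       | some row =>
         match row.get? type_field with
         | none => acc
         | some typ =>
           if !(hierarchy.contains typ) then acc
           else if (PySem.Dict.ofList schema).keys.all (fun k =>
                   (!(row.getD k "" == "")) &&
                   ((!((PySem.Dict.ofList schema).getD k "" == "int")) || pvIntLike (row.getD k "")))
           then acc ++ [(typ, (schema.map (fun p => p.1)).map (fun k => row.getD k ""))]
           else acc)
    = (match pvLineRes schema hierarchy type_field delimiter line with
       | some p => acc ++ [p]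
       | none => acc) := by
  unfold pvLineRes
  by_cases h0 : (PySem.Str.strip line == "") = true
  · simp [h0]
  · cases hp : pvParseB line delimiter with
    | none => simp [h0, hp]
    | some row =>
      cases hg : row.get? type_field with
      | none => simp [h0, hp, hg]
      | some typ =>
        by_cases ht : typ ∈ hierarchy
        · by_cases hv : ((PySem.Dict.ofList schema).keys.all (fun k =>
              (!(row.getD k "" == "")) &&
              ((!((PySem.Dict.ofList schema).getD k "" == "int")) || pvIntLike (row.getD k "")))) = true
          · simp [h0, hp, hg, ht, hv]
          · simp [h0, hp, hg, ht, hv]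
        · simp [h0, hg, ht]

theorem foldA_eq (lines : List String) (schema : List (String × String)) (hierarchy : List String)
    (type_field delimiter : String) (d0 : PySem.Dict String (List (List String))) :
    lines.foldl (fun d line =>
      if PySem.Str.strip line == "" then d
      else
        match parse_row line delimiter with
        | none => d
        | some row =>
          match row.get? type_field with
          | none => d
          | some typ =>
            if !(hierarchy.contains typ) then d
            else if !(validate_row row schema (schema.foldl (fun d p => d.insert p.1 (type_validator p.2)) PySem.Dict.empty)) then d
            else d.modify typ [] (fun l => l ++ [(schema.map (fun p => p.1)).map (fun k => row.getD k "")])) d0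
    = (lines.filterMap (pvLineRes schema hierarchy type_field delimiter)).foldl
        (fun d p => d.modify p.1 [] (fun l => l ++ [p.2])) d0 := by
  rw [List.foldl_filterMap]
  refine List.foldl_ext _ _ d0 (fun d line _ => ?_)
  rw [stepA_eq schema hierarchy type_field delimiter d line]
  cases pvLineRes schema hierarchy type_field delimiter line <;> rfl

def pvStepApp {α β : Type} (f : α → Option β) (acc : List β) (x : α) : List β :=
  match f x with | some p => acc ++ [p] | none => acc

theorem foldl_stepApp_filterMap {α β : Type} (f : α → Option β) (l : List α) (acc : List β) :
    l.foldl (pvStepApp f) acc = acc ++ l.filterMap f := by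
  induction l generalizing acc with
  | nil => simp
  | cons x rest ih =>
    cases hf : f x <;> simp [pvStepApp, hf, ih]

theorem foldB_eq (lines : List String) (schema : List (String × String)) (hierarchy : List String)
    (type_field delimiter : String) :
    lines.foldl (fun acc line =>
      if PySem.Str.strip line == "" then acc
      else
        match pvParseB line delimiter with
        | none => acc
        | some row =>
          match row.get? type_field with
          | none => acc
          | some typ =>
            if !(hierarchy.contains typ) then acc
            else if (PySem.Dict.ofList schema).keys.all (fun k =>
                    (!(row.getD k "" == "")) &&
                    ((!((PySem.Dict.ofList schema).getD k "" == "int")) || pvIntLike (row.getD k "")))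
            then acc ++ [(typ, (schema.map (fun p => p.1)).map (fun k => row.getD k ""))]
            else acc) ([] : List (String × List String))
    = lines.filterMap (pvLineRes schema hierarchy type_field delimiter) := by
  have h1 := List.foldl_ext (l := lines) _ (pvStepApp (pvLineRes schema hierarchy type_field delimiter))
    ([] : List (String × List String))
    (fun acc line _ => (stepB_eq schema hierarchy type_field delimiter acc line).trans
      (by cases h : pvLineRes schema hierarchy type_field delimiter line <;> simp [pvStepApp, h]))
  rw [h1]
  simpa using foldl_stepApp_filterMap (pvLineRes schema hierarchy type_field delimiter) lines []

-- ===== VERDICT (by name: the statement is the Claim_ definition above) =====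
theorem run_ingest_spec : Claim_equal_run_ingest := by
  intro lines schema hierarchy type_field delimiter _ _
  unfold Spec_run_ingest
  simp only [run_ingest, run_ingest_alt, foldA_eq, foldB_eq]
  refine Prod.ext rfl ?_
  have hgd : ∀ t : String,
      (((lines.filterMap (pvLineRes schema hierarchy type_field delimiter)).foldl
        (fun d p => d.modify p.1 [] (fun l => l ++ [p.2]))
        (hierarchy.foldl (fun d t => d.insert t ([] : List (List String))) PySem.Dict.empty)).getD t [])
      = ((lines.filterMap (pvLineRes schema hierarchy type_field delimiter)).filter (fun p => p.1 == t)).map (fun p => p.2) := by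
    intro t
    rw [PySem.Dict.getD_foldl_modify_append, getD_init]
    simp
  simp only [hgd, PySem.List.foldl_append_eq_flatMap, List.nil_append]
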